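-- pv_equiv track=rewrite | github.com/doocs/leetcode | solution/1700-1799/1707.Maximum XOR With an Element From Array/Solution.py | maximizeXor
-- ===== SOURCE A (Python) =====
-- from typing import List
--
-- class Trie:
--     def __init__(self):
--         self.children = [None] * 2
--
--     def insert(self, x):
--         node = self
--         for i in range(30, -1, -1):
--             v = (x >> i) & 1
--             if node.children[v] is None:
--                 node.children[v] = Trie()
--             node = node.children[v]
--
--     def search(self, x):
--         node = self
--         ans = 0
--         for i in range(30, -1, -1):
--             v = (x >> i) & 1
--             if node.children[v ^ 1]:
--                 ans |= 1 << i
--                 node = node.children[v ^ 1]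
--             elif node.children[v]:
--                 node = node.children[v]
--             else:
--                 return -1
--         return ans
--
-- def maximizeXor(nums: List[int], queries: List[List[int]]) -> List[int]:
--     trie = Trie()
--     nums.sort()
--     j, n = 0, len(queries)
--     ans = [-1] * n
--     for i, (x, m) in sorted(zip(range(n), queries), key=lambda x: x[1][1]):
--         while j < len(nums) and nums[j] <= m:
--             trie.insert(nums[j])
--             j += 1
--         ans[i] = trie.search(x)
--     return ans
-- ===== SOURCE B (Python) =====
-- from typing import List
--
-- def maximizeXor(nums: List[int], queries: List[List[int]]) -> List[int]:
--     # Brute force per query: nums sorted ascending (kept in place, as the original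
--     # sorts nums too), scan candidates v <= m and take the best 31-bit XOR with x.
--     nums.sort()
--     mask = (1 << 31) - 1
--     res = []
--     for x, m in queries:
--         best = -1
--         for v in nums:
--             if v > m:
--                 break
--             cur = (x ^ v) & mask
--             if cur > best:
--                 best = cur
--         res.append(best)
--     return res
-- ===== Notes on version B (the rewrite author's own statement) =====
-- stated objective: simpler
-- what changed: Replaces the offline algorithm (sort queries by limit, incrementally insert into a bit trie, greedy descent per query) with a direct per-query linear scan of the sorted nums that maximizes the 31-bit XOR (x ^ v) & (2^31 - 1) over v <= m, which is exactly the value the trie's 31-level descent computes.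
import Mathlib
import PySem

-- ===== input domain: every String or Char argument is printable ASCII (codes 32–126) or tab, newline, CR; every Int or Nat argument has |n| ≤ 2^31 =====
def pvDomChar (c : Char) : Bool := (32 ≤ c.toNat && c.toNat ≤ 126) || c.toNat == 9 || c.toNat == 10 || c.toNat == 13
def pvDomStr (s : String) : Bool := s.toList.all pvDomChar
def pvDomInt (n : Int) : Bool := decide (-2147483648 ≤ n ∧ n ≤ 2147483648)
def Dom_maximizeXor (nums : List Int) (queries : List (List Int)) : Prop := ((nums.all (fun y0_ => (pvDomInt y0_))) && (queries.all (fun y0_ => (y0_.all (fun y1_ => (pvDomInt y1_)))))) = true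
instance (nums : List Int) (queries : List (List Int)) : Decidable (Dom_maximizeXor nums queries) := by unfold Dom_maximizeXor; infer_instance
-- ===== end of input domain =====

-- B replaces the offline sorted-queries + binary-trie algorithm by a direct per-query
-- scan of the sorted nums maximizing the 31-bit XOR (x ^ v) & (2^31 - 1) — the exact
-- value the trie's 31-level descent computes.  (Python A sorts `nums` in place; the
-- Python B keeps that same in-place sort, and the equivalence here is about the
-- return value.)

-- ===== PORT A =====
inductive PvTrie : Type
  | nil : PvTrie
  | node : PvTrie → PvTrie → PvTrie
deriving DecidableEq, Repr

def PvTrie.child : PvTrie → Int → PvTrie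
  | .nil, _ => .nil
  | .node a b, v => if v = 0 then a else b

def PvTrie.setChild : PvTrie → Int → PvTrie → PvTrie
  | .nil, v, c => if v = 0 then .node c .nil else .node .nil c
  | .node a b, v, c => if v = 0 then .node c b else .node a c

-- Trie.insert: walk bits 30..0, creating missing children
def PvTrie.insertBits : PvTrie → List Int → PvTrie
  | t, [] => t
  | t, v :: rest =>
      let c := t.child v
      let c' := if c = PvTrie.nil then PvTrie.node .nil .nil else c
      t.setChild v (PvTrie.insertBits c' rest)

def pvBits (x : Int) : List Int :=
  (PySem.List.pyRange 30 (-1) (-1)).map (fun i => PySem.Int.band (x >>> i.toNat) 1)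

def PvTrie.insert (t : PvTrie) (x : Int) : PvTrie := t.insertBits (pvBits x)

-- Trie.search: greedy descent preferring the opposite bit, ans |= 1 << i
def PvTrie.searchBits : PvTrie → List (Int × Int) → Int → Int
  | _, [], ans => ans
  | t, (i, v) :: rest, ans =>
      if t.child (PySem.Int.bxor v 1) ≠ PvTrie.nil then
        PvTrie.searchBits (t.child (PySem.Int.bxor v 1)) rest (PySem.Int.bor ans (1 <<< i.toNat))
      else if t.child v ≠ PvTrie.nil then
        PvTrie.searchBits (t.child v) rest ans
      else (-1)

def PvTrie.search (t : PvTrie) (x : Int) : Int :=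
  t.searchBits ((PySem.List.pyRange 30 (-1) (-1)).map
    (fun i => (i, PySem.Int.band (x >>> i.toNat) 1))) 0

-- `while j < len(nums) and nums[j] <= m: trie.insert(nums[j]); j += 1`
def pvFill (t : PvTrie) (sn : List Int) (j : Nat) (m : Int) : PvTrie × Nat :=
  if h : j < sn.length then
    if sn[j] ≤ m then pvFill (t.insert sn[j]) sn (j + 1) m else (t, j)
  else (t, j)
termination_by sn.length - j

-- `for i, (x, m) in sorted(zip(range(n), queries), key=lambda x: x[1][1]): … ans[i] = trie.search(x)`
def pvMain : PvTrie → List Int → Nat → List Int → List (Int × List Int) → List Int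
  | _, _, _, ans, [] => ans
  | t, sn, j, ans, (i, q) :: rest =>
      let x := PySem.List.pyGetD q 0 0
      let m := PySem.List.pyGetD q 1 0
      let r := pvFill t sn j m
      pvMain r.1 sn r.2 (ans.set i.toNat (r.1.search x)) rest

def maximizeXor (nums : List Int) (queries : List (List Int)) : List Int :=
  let sn := PySem.List.sorted nums (fun v => v) false
  let n := queries.length
  let ans := List.replicate n (-1 : Int)
  let pairs := PySem.List.sorted (List.zip ((List.range n).map Int.ofNat) queries)
      (fun p => PySem.List.pyGetD p.2 1 0) false
  pvMain (PvTrie.node .nil .nil) sn 0 ans pairs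

-- ===== PORT B =====
def pvMask : Int := (1 : Int) <<< (31 : Nat) - 1

-- per-query scan of the ascending nums; stops at the first v > m
def pvBest : List Int → Int → Int → Int → Int
  | [], _, _, best => best
  | v :: rest, x, m, best =>
      if v > m then best
      else
        let cur := PySem.Int.band (PySem.Int.bxor x v) pvMask
        pvBest rest x m (if cur > best then cur else best)

def maximizeXor_alt (nums : List Int) (queries : List (List Int)) : List Int :=
  let sn := PySem.List.sorted nums (fun v => v) false
  queries.map (fun q => pvBest sn (PySem.List.pyGetD q 0 0) (PySem.List.pyGetD q 1 0) (-1))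

-- ===== PRECONDITION & SPEC =====
-- Python A unpacks each query as `(x, m)` and sorts by `x[1][1]`, so it raises
-- (ValueError / IndexError) unless every query has exactly two entries.
def Pre_maximizeXor (nums : List Int) (queries : List (List Int)) : Prop :=
  ∀ q ∈ queries, q.length = 2
instance (nums : List Int) (queries : List (List Int)) : Decidable (Pre_maximizeXor nums queries) := by
  unfold Pre_maximizeXor; infer_instance

def pvWitness_maximizeXor : List Int × List (List Int) :=
  ([3, 10, 5, 25, 2, 8], [[536870912, 21], [12, 4], [-3, 8], [1, -2]])

def Spec_maximizeXor (nums : List Int) (queries : List (List Int)) (out : List Int) : Prop := out = maximizeXor_alt nums queries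
instance (nums : List Int) (queries : List (List Int)) (out : List Int) : Decidable (Spec_maximizeXor nums queries out) := by unfold Spec_maximizeXor; infer_instance

-- ===== CLAIM (what is proved, stated in full; the proofs are below) =====
def Claim_equal_maximizeXor : Prop := ∀ (nums : List Int) (queries : List (List Int)), Dom_maximizeXor nums queries → Pre_maximizeXor nums queries → Spec_maximizeXor nums queries (maximizeXor nums queries)

-- ===== LEMMAS AND PROOFS =====

lemma pv_two_mul_lor_one (c : Nat) : 2*c ||| 1 = 2*c+1 := by
  apply Nat.eq_of_testBit_eq
  intro i
  cases i with
  | zero => simp [Nat.testBit_lor, Nat.testBit_zero]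
  | succ i =>
      have h1 : (2*c+1) / 2 = c := by omega
      have h2 : (2*c) / 2 = c := by omega
      rw [Nat.testBit_lor]
      simp [Nat.testBit_succ, h1, h2]

lemma pv_lor_pow (c d : Nat) : c * 2^(d+1) ||| 2^d = c * 2^(d+1) + 2^d := by
  calc c * 2^(d+1) ||| 2^d
      = ((2*c) <<< d) ||| ((1:Nat) <<< d) := by rw [Nat.shiftLeft_eq, Nat.shiftLeft_eq]; ring_nf
    _ = (2*c ||| 1) <<< d := Nat.shiftLeft_or_distrib.symm
    _ = (2*c+1) <<< d := by rw [pv_two_mul_lor_one]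
    _ = c * 2^(d+1) + 2^d := by rw [Nat.shiftLeft_eq]; ring

-- band with mask = emod 2^31
lemma pv_band_mask (z : Int) : PySem.Int.band z pvMask = z % 2147483648 := by
  have hm : pvMask = (2147483647 : Int) := by decide
  rw [hm]
  unfold PySem.Int.band
  by_cases hz : 0 ≤ z
  · rw [if_pos hz, if_pos (by norm_num)]
    have : (2147483647 : Int).toNat = 2^31 - 1 := by decide
    rw [this, Nat.and_two_pow_sub_one_eq_mod]
    have hz' : z = (z.toNat : Int) := (Int.toNat_of_nonneg hz).symm
    rw [hz']
    push_cast
    norm_num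
  · rw [if_neg hz, if_pos (by norm_num)]
    have h1 : (2147483647 : Int).toNat = 2^31 - 1 := by decide
    rw [h1, Nat.and_comm, Nat.and_two_pow_sub_one_eq_mod]
    have hw : ((-z-1).toNat : Int) = -z-1 := Int.toNat_of_nonneg (by omega)
    set w := (-z-1).toNat with hwdef
    have hmono : (w % 2^31 : Nat) < 2^31 := Nat.mod_lt _ (by norm_num)
    have hcast : ((w % 2^31 : Nat) : Int) = (w : Int) % 2147483648 := by
      push_cast; norm_num
    omega

lemma pv_shiftR_negSucc (n k : Nat) : (Int.negSucc n) >>> k = Int.negSucc (n >>> k) := rfl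

lemma pv_shiftR_natCast (n k : Nat) : ((n : Int)) >>> k = ((n >>> k : Nat) : Int) := rfl

lemma pv_neg_negSucc_sub_one (n : Nat) : -Int.negSucc n - 1 = (n : Int) := by
  simp [Int.negSucc_eq]

lemma pv_shiftR_negcast (p k : Nat) : (-(p:Int) - 1) >>> k = -((p >>> k : Nat):Int) - 1 := by
  have h : (-(p:Int) - 1) = Int.negSucc p := by simp [Int.negSucc_eq]; ring
  rw [h, pv_shiftR_negSucc, Int.negSucc_eq]; ring

lemma pv_negSucc_nonneg_iff (n : Nat) : (0 ≤ Int.negSucc n) ↔ False := by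
  simp [Int.negSucc_eq]
  omega

lemma pv_bxor_shiftR (x v : Int) (k : Nat) :
    (PySem.Int.bxor x v) >>> k = PySem.Int.bxor (x >>> k) (v >>> k) := by
  unfold PySem.Int.bxor
  rcases x with m | m <;> rcases v with n | n <;>
    simp only [Int.ofNat_eq_natCast, pv_shiftR_natCast, pv_shiftR_negSucc,
      pv_negSucc_nonneg_iff, pv_neg_negSucc_sub_one, Int.natCast_nonneg,
      Int.toNat_natCast, if_true, if_false, iff_false] <;>
    simp [pv_negSucc_nonneg_iff, Int.negSucc_eq, pv_shiftR_natCast, pv_shiftR_negcast,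
      Nat.shiftRight_xor_distrib]

lemma pv_bxor_emod_two (a b : Int) : (PySem.Int.bxor a b) % 2 = (a % 2 + b % 2) % 2 := by
  unfold PySem.Int.bxor
  rcases a with m | m <;> rcases b with n | n <;>
    simp only [Int.ofNat_eq_natCast, pv_negSucc_nonneg_iff, pv_neg_negSucc_sub_one,
      Int.natCast_nonneg, Int.toNat_natCast, if_true, if_false, iff_false] <;>
    (try simp only [Int.negSucc_eq]) <;>
  · have hx := Nat.xor_mod_two_eq (m := m) (n := n)
    have hc1 : (((m ^^^ n) % 2 : Nat) : Int) = ((m ^^^ n : Nat) : Int) % 2 := by push_cast; ring_nf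
    have hc2 : (((m + n) % 2 : Nat) : Int) = (((m:Int) + n) % 2) := by push_cast; ring_nf
    have hc3 : ((m ^^^ n : Nat) : Int) % 2 = ((m:Int) + (n:Int)) % 2 := by
      rw [← hc1, hx, hc2]
    omega

lemma pv_emod_pow_succ (z : Int) (k : Nat) :
    z % (2^(k+1) : Nat) = z % (2^k : Nat) + (2^k : Nat) * ((z >>> k) % 2) := by
  have hshift : z >>> k = z / (2^k : Nat) := by
    rw [Int.shiftRight_eq_div_pow]
  set M : Int := ((2^k : Nat) : Int) with hM
  have hMpos : 0 < M := by positivity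
  set a := z / M with ha
  set r := z % M with hr
  have hza : z = M * a + r := by rw [ha, hr]; rw [Int.ediv_add_emod]
  have hr0 : 0 ≤ r := Int.emod_nonneg z (by omega)
  have hrM : r < M := Int.emod_lt_of_pos z hMpos
  have ha2 : a = 2 * (a / 2) + a % 2 := by omega
  have hm2 : 0 ≤ a % 2 ∧ a % 2 < 2 := by omega
  have hM2 : ((2^(k+1) : Nat) : Int) = 2 * M := by rw [hM]; push_cast; ring
  have hz2 : z = (2 * M) * (a / 2) + (M * (a % 2) + r) := by
    calc z = M * a + r := hza
      _ = M * (2 * (a / 2) + a % 2) + r := by rw [← ha2]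
      _ = (2 * M) * (a / 2) + (M * (a % 2) + r) := by ring
  have hs0 : 0 ≤ M * (a % 2) + r := by nlinarith [hm2.1, hr0, hMpos.le]
  have hsM : M * (a % 2) + r < 2 * M := by nlinarith [hm2.2, hrM, hMpos]
  rw [hM2, hshift]
  calc z % (2 * M) = ((M * (a % 2) + r) + (2 * M) * (a / 2)) % (2 * M) := by
        conv_lhs => rw [hz2]
        ring_nf
    _ = (M * (a % 2) + r) % (2 * M) := by rw [Int.add_mul_emod_self_left]
    _ = M * (a % 2) + r := Int.emod_eq_of_lt hs0 hsM
    _ = r + M * (a % 2) := by ring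

lemma pv_emod_sum (k : Nat) (z : Int) :
    z % (2^k : Nat) = ((List.range k).map (fun i => ((2^i : Nat) : Int) * ((z >>> i) % 2))).sum := by
  induction k with
  | zero => simp
  | succ k ih =>
      rw [List.range_succ, List.map_append, List.sum_append, ← ih, pv_emod_pow_succ]
      simp

def pvDescRange : Nat → List Int
  | 0 => []
  | d+1 => (d : Int) :: pvDescRange d

lemma pv_pyRange_desc : PySem.List.pyRange 30 (-1) (-1) = pvDescRange 31 := by decide

def pvDif (x v : Int) (i : Nat) : Int := if (x >>> i) % 2 = (v >>> i) % 2 then 0 else 1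

lemma pv_mxor_sum (x v : Int) :
    PySem.Int.band (PySem.Int.bxor x v) pvMask
      = ((List.range 31).map (fun i => ((2^i:Nat):Int) * pvDif x v i)).sum := by
  rw [pv_band_mask]
  have h1 : (2147483648 : Int) = ((2^31 : Nat) : Int) := by norm_num
  rw [h1, pv_emod_sum]
  congr 1
  apply List.map_congr_left
  intro i _
  congr 1
  rw [pv_bxor_shiftR, pv_bxor_emod_two]
  have hx : 0 ≤ (x >>> i) % 2 ∧ (x >>> i) % 2 < 2 := ⟨Int.emod_nonneg _ (by omega), Int.emod_lt_of_pos _ (by omega)⟩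
  have hv : 0 ≤ (v >>> i) % 2 ∧ (v >>> i) % 2 < 2 := ⟨Int.emod_nonneg _ (by omega), Int.emod_lt_of_pos _ (by omega)⟩
  unfold pvDif
  split_ifs with h
  · omega
  · omega

-- --- trie path semantics ---
def pvMemP : PvTrie → List Int → Prop
  | t, [] => t ≠ PvTrie.nil
  | t, v :: r => pvMemP (t.child v) r

def pvBits01 (p : List Int) : Prop := ∀ b ∈ p, b = 0 ∨ b = 1

lemma pv_memP_nil : ∀ p, ¬ pvMemP PvTrie.nil p := by
  intro p
  induction p with
  | nil => simp [pvMemP]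
  | cons v r ih => simpa [pvMemP, PvTrie.child] using ih

lemma pv_child_setChild (t : PvTrie) (v w : Int) (c : PvTrie)
    (hv : v = 0 ∨ v = 1) (hw : w = 0 ∨ w = 1) :
    (t.setChild v c).child w = if w = v then c else t.child w := by
  rcases hv with hv | hv <;> rcases hw with hw | hw <;> subst hv <;> subst hw <;>
    cases t <;> simp [PvTrie.child, PvTrie.setChild]

lemma pv_memP_insertBits : ∀ (bits p : List Int) (t : PvTrie),
    t ≠ PvTrie.nil → pvBits01 bits → pvBits01 p → p.length = bits.length →
    (pvMemP (t.insertBits bits) p ↔ pvMemP t p ∨ p = bits) := by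
  intro bits
  induction bits with
  | nil =>
      intro p t ht _ _ hl
      rw [List.length_nil, List.length_eq_zero_iff] at hl
      subst hl
      simp [PvTrie.insertBits, pvMemP, ht]
  | cons v rest ih =>
      intro p t ht hb hp hl
      rcases p with _ | ⟨w, r⟩
      · simp at hl
      · have hv : v = 0 ∨ v = 1 := hb v (by simp)
        have hw : w = 0 ∨ w = 1 := hp w (by simp)
        have hrest01 : pvBits01 rest := fun b hbm => hb b (by simp [hbm])
        have hr01 : pvBits01 r := fun b hbm => hp b (by simp [hbm])
        have hlen : r.length = rest.length := by simpa using hl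
        show pvMemP (PvTrie.insertBits t (v :: rest)) (w :: r) ↔ _
        have hunf : PvTrie.insertBits t (v :: rest)
            = t.setChild v (PvTrie.insertBits (if t.child v = PvTrie.nil then PvTrie.node .nil .nil else t.child v) rest) := by
          simp [PvTrie.insertBits]
        rw [hunf]
        by_cases hwv : w = v
        · subst hwv
          have hmem : pvMemP (t.setChild w (PvTrie.insertBits (if t.child w = PvTrie.nil then PvTrie.node .nil .nil else t.child w) rest)) (w :: r)
              = pvMemP (PvTrie.insertBits (if t.child w = PvTrie.nil then PvTrie.node .nil .nil else t.child w) rest) r := by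
            show pvMemP ((t.setChild w _).child w) r = _
            rw [pv_child_setChild t w w _ hw hw, if_pos rfl]
          rw [hmem]
          by_cases hc : t.child w = PvTrie.nil
          · rw [if_pos hc]
            rw [ih r (PvTrie.node .nil .nil) (by simp) hrest01 hr01 hlen]
            show pvMemP (PvTrie.node PvTrie.nil PvTrie.nil) r ∨ r = rest ↔ pvMemP (t.child w) r ∨ w :: r = w :: rest
            rcases r with _ | ⟨s, r'⟩
            · have : rest = [] := by simpa using hlen.symm
              subst this
              simp [pvMemP, hc]
            · have hnm : ¬ pvMemP (PvTrie.node PvTrie.nil PvTrie.nil) (s :: r') := by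
                show ¬ pvMemP ((PvTrie.node PvTrie.nil PvTrie.nil).child s) r'
                have : (PvTrie.node PvTrie.nil PvTrie.nil).child s = PvTrie.nil := by
                  rcases hp s (by simp) with h | h <;> simp [h, PvTrie.child]
                rw [this]; exact pv_memP_nil r'
              have hnm2 : ¬ pvMemP (t.child w) (s :: r') := by
                show ¬ pvMemP ((t.child w).child s) r'
                rw [hc]
                have : PvTrie.nil.child s = PvTrie.nil := rfl
                rw [this]; exact pv_memP_nil r'
              simp [hnm, hnm2]
          · rw [if_neg hc]
            rw [ih r (t.child w) hc hrest01 hr01 hlen]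
            show pvMemP (t.child w) r ∨ r = rest ↔ pvMemP (t.child w) r ∨ w :: r = w :: rest
            simp
        · have hmem : pvMemP (t.setChild v (PvTrie.insertBits (if t.child v = PvTrie.nil then PvTrie.node .nil .nil else t.child v) rest)) (w :: r)
              = pvMemP (t.child w) r := by
            show pvMemP ((t.setChild v _).child w) r = _
            rw [pv_child_setChild t v w _ hv hw, if_neg hwv]
          rw [hmem]
          have : ¬ (w :: r = v :: rest) := by
            intro hcon; exact hwv (by injection hcon)
          simp [this]
          rfl

-- --- fullness ---
def pvFull : Nat → PvTrie → Prop
  | 0, _ => True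
  | _+1, PvTrie.nil => True
  | d+1, PvTrie.node a b => (a ≠ PvTrie.nil ∨ b ≠ PvTrie.nil) ∧ pvFull d a ∧ pvFull d b

lemma pv_full_nil (d : Nat) : pvFull d PvTrie.nil := by cases d <;> trivial

lemma pv_full_insertBits : ∀ (bits : List Int) (d : Nat) (t : PvTrie),
    bits.length = d → pvBits01 bits →
    (t = PvTrie.node .nil .nil ∨ (pvFull d t ∧ t ≠ PvTrie.nil)) →
    pvFull d (t.insertBits bits) ∧ t.insertBits bits ≠ PvTrie.nil := by
  intro bits
  induction bits with
  | nil =>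
      intro d t hl hb hcase
      rw [List.length_nil] at hl; subst hl
      rcases hcase with h | ⟨hf, hn⟩
      · exact ⟨trivial, by simp [PvTrie.insertBits, h]⟩
      · exact ⟨trivial, by simpa [PvTrie.insertBits] using hn⟩
  | cons v rest ih =>
      intro d t hl hb hcase
      rcases d with _ | d
      · simp at hl
      have hv : v = 0 ∨ v = 1 := hb v (by simp)
      have hrest01 : pvBits01 rest := fun b hbm => hb b (by simp [hbm])
      have hlen : rest.length = d := by simpa using hl
      rcases t with _ | ⟨a, b⟩
      · rcases hcase with h | ⟨_, hn⟩
        · exact absurd h (by simp)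
        · exact absurd rfl hn
      have hunf : PvTrie.insertBits (PvTrie.node a b) (v :: rest)
          = (PvTrie.node a b).setChild v (PvTrie.insertBits (if (PvTrie.node a b).child v = PvTrie.nil then PvTrie.node .nil .nil else (PvTrie.node a b).child v) rest) := by
        simp [PvTrie.insertBits]
      rw [hunf]
      have hrec : pvFull d (PvTrie.insertBits (if (PvTrie.node a b).child v = PvTrie.nil then PvTrie.node .nil .nil else (PvTrie.node a b).child v) rest)
          ∧ PvTrie.insertBits (if (PvTrie.node a b).child v = PvTrie.nil then PvTrie.node .nil .nil else (PvTrie.node a b).child v) rest ≠ PvTrie.nil := by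
        apply ih d _ hlen hrest01
        by_cases hc : (PvTrie.node a b).child v = PvTrie.nil
        · rw [if_pos hc]; left; rfl
        · rw [if_neg hc]; right
          refine ⟨?_, hc⟩
          rcases hcase with h | ⟨hf, _⟩
          · exfalso
            apply hc
            have : a = PvTrie.nil ∧ b = PvTrie.nil := by
              constructor <;> injection h
            rcases hv with hv | hv <;> simp [hv, PvTrie.child, this.1, this.2]
          · obtain ⟨hne, hfa, hfb⟩ := hf
            rcases hv with hv | hv <;> subst hv <;> simpa [PvTrie.child] using (by assumption : pvFull d _)
      have hother : pvFull d a ∧ pvFull d b := by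
        rcases hcase with h | ⟨hf, _⟩
        · have h2 : a = PvTrie.nil ∧ b = PvTrie.nil := by constructor <;> injection h
          rw [h2.1, h2.2]; exact ⟨pv_full_nil d, pv_full_nil d⟩
        · obtain ⟨hne, hfa, hfb⟩ := hf
          exact ⟨hfa, hfb⟩
      rcases hv with hv | hv <;> subst hv <;>
        simp only [PvTrie.setChild, if_pos rfl, reduceIte] <;>
        refine ⟨⟨?_, ?_, ?_⟩, by simp⟩
      · exact Or.inl hrec.2
      · exact hrec.1
      · exact hother.2
      · exact Or.inr hrec.2
      · exact hother.1
      · exact hrec.1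

-- --- shape of the searchBits argument and path values ---
def pvShaped : Nat → List (Int × Int) → Prop
  | 0, [] => True
  | 0, _ :: _ => False
  | _+1, [] => False
  | d+1, (i, v) :: r => i = (d : Int) ∧ (v = 0 ∨ v = 1) ∧ pvShaped d r

def pvXval : List (Int × Int) → List Int → Int
  | (i, v) :: pr, b :: br => (if b = v then 0 else ((2^i.toNat : Nat) : Int)) + pvXval pr br
  | _, _ => 0

lemma pvXval_cons (i v b : Int) (pr : List (Int × Int)) (br : List Int) :
    pvXval ((i, v) :: pr) (b :: br)
      = (if b = v then 0 else ((2^i.toNat : Nat) : Int)) + pvXval pr br := rfl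

lemma pv_xval_bounds : ∀ (d : Nat) (pairs : List (Int × Int)) (p : List Int),
    pvShaped d pairs → p.length = d →
    0 ≤ pvXval pairs p ∧ pvXval pairs p < ((2^d : Nat) : Int) := by
  intro d
  induction d with
  | zero =>
      intro pairs p hs hl
      rcases pairs with _ | ⟨iv, r⟩
      · rw [List.length_eq_zero_iff] at hl; subst hl
        simp [pvXval]
      · exact absurd hs (by simp [pvShaped])
  | succ d ih =>
      intro pairs p hs hl
      rcases pairs with _ | ⟨⟨i, v⟩, r⟩
      · exact absurd hs (by simp [pvShaped])
      obtain ⟨hi, hv, hr⟩ := hs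
      rcases p with _ | ⟨b, br⟩
      · simp at hl
      have hlb : br.length = d := by simpa using hl
      obtain ⟨h0, h1⟩ := ih r br hr hlb
      subst hi
      have hit : ((d : Int)).toNat = d := Int.toNat_natCast d
      have hcast : ((2^(d+1) : Nat) : Int) = 2 * ((2^d : Nat) : Int) := by push_cast; ring
      have hx : pvXval (((d : Int), v) :: r) (b :: br)
          = (if b = v then 0 else ((2^d : Nat) : Int)) + pvXval r br := by
        show (if b = v then 0 else ((2^((d : Int)).toNat : Nat) : Int)) + pvXval r br = _
        rw [hit]
      rw [hx, hcast]
      constructor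
      · split_ifs <;> omega
      · split_ifs <;> omega

lemma pv_greedy : ∀ (d : Nat) (pairs : List (Int × Int)) (t : PvTrie) (c : Nat),
    pvShaped d pairs → pvFull d t → t ≠ PvTrie.nil →
    ∃ p, p.length = d ∧ pvBits01 p ∧ pvMemP t p ∧
      PvTrie.searchBits t pairs ((c * 2^d : Nat) : Int) = ((c * 2^d : Nat) : Int) + pvXval pairs p ∧
      (∀ p', p'.length = d → pvBits01 p' → pvMemP t p' → pvXval pairs p' ≤ pvXval pairs p) := by
  intro d
  induction d with
  | zero =>
      intro pairs t c hs hf ht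
      rcases pairs with _ | ⟨iv, r⟩
      · refine ⟨[], rfl, by intro b hb; simp at hb, ht, by simp [PvTrie.searchBits, pvXval], ?_⟩
        intro p' hl' _ _
        rw [List.length_eq_zero_iff] at hl'; subst hl'
        simp [pvXval]
      · exact absurd hs (by simp [pvShaped])
  | succ d ih =>
      intro pairs t c hs hf ht
      rcases pairs with _ | ⟨⟨i, v⟩, rest⟩
      · exact absurd hs (by simp [pvShaped])
      obtain ⟨hi, hv, hrest⟩ := hs
      subst hi
      rcases t with _ | ⟨a, b⟩
      · exact absurd rfl ht
      obtain ⟨hne, hfa, hfb⟩ := hf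
      have hvx : PySem.Int.bxor v 1 = 1 - v := by
        rcases hv with hv | hv <;> subst hv <;> decide
      have hvx01 : (1 - v = 0 ∨ 1 - v = 1) := by omega
      have hchild_of : ∀ w : Int, (PvTrie.node a b).child w = if w = 0 then a else b := by
        intro w; rfl
      have hit : (((d : Int))).toNat = d := Int.toNat_natCast d
      have hunf : ∀ ans, PvTrie.searchBits (PvTrie.node a b) (((d : Int), v) :: rest) ans
          = if (PvTrie.node a b).child (PySem.Int.bxor v 1) ≠ PvTrie.nil then
              PvTrie.searchBits ((PvTrie.node a b).child (PySem.Int.bxor v 1)) rest (PySem.Int.bor ans (1 <<< ((d : Int)).toNat))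
            else if (PvTrie.node a b).child v ≠ PvTrie.nil then
              PvTrie.searchBits ((PvTrie.node a b).child v) rest ans
            else (-1) := by
        intro ans; rfl
      have hfopp : pvFull d ((PvTrie.node a b).child (1 - v)) := by
        rw [hchild_of]
        split_ifs <;> assumption
      have hfsam : pvFull d ((PvTrie.node a b).child v) := by
        rw [hchild_of]
        split_ifs <;> assumption
      by_cases hopp : (PvTrie.node a b).child (1 - v) ≠ PvTrie.nil
      · -- the opposite-bit child exists: descend there, gaining 2^d
        have hbor : PySem.Int.bor ((c * 2^(d+1) : Nat) : Int) (((1 <<< d : Nat) : Int))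
            = (((2*c+1) * 2^d : Nat) : Int) := by
          rw [PySem.Int.bor_natCast, Nat.one_shiftLeft, pv_lor_pow]
          congr 1
          ring
        obtain ⟨p, hl, h01, hm, hval, hmax⟩ := ih rest _ (2*c+1) hrest hfopp hopp
        refine ⟨(1 - v) :: p, by simp [hl], ?_, ?_, ?_, ?_⟩
        · intro x hx
          rcases List.mem_cons.mp hx with h | h
          · omega
          · exact h01 x h
        · show pvMemP ((PvTrie.node a b).child (1 - v)) p
          exact hm
        · rw [hunf, hvx, if_pos hopp, hit, hbor, hval, pvXval_cons]
          simp only [hit]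
          rw [if_neg (by omega : ¬ ((1 : Int) - v = v))]
          push_cast
          ring
        · intro p' hl' h01' hm'
          rcases p' with _ | ⟨w, r'⟩
          · simp at hl'
          have hw : w = 0 ∨ w = 1 := h01' w (by simp)
          have hr01' : pvBits01 r' := fun x hx => h01' x (by simp [hx])
          have hlr' : r'.length = d := by simpa using hl'
          rw [pvXval_cons, pvXval_cons]
          simp only [hit]
          rw [if_neg (by omega : ¬ ((1 : Int) - v = v))]
          by_cases hwv : w = v
          · rw [if_pos hwv]
            have hb1 := pv_xval_bounds d rest r' hrest hlr'
            have hb2 := pv_xval_bounds d rest p hrest hl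
            omega
          · rw [if_neg hwv]
            have hw' : w = 1 - v := by omega
            have hmem' : pvMemP ((PvTrie.node a b).child (1 - v)) r' := by
              rw [← hw']
              exact hm'
            have := hmax r' hlr' hr01' hmem'
            omega
      · rw [not_not] at hopp
        by_cases hsam : (PvTrie.node a b).child v ≠ PvTrie.nil
        · have hcans : ((c * 2^(d+1) : Nat) : Int) = (((2*c) * 2^d : Nat) : Int) := by
            congr 1; ring
          obtain ⟨p, hl, h01, hm, hval, hmax⟩ := ih rest _ (2*c) hrest hfsam hsam
          refine ⟨v :: p, by simp [hl], ?_, ?_, ?_, ?_⟩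
          · intro x hx
            rcases List.mem_cons.mp hx with h | h
            · omega
            · exact h01 x h
          · show pvMemP ((PvTrie.node a b).child v) p
            exact hm
          · rw [hunf, hvx, if_neg (by simpa using hopp), if_pos hsam, hcans, hval, pvXval_cons]
            rw [if_pos rfl]
            ring
          · intro p' hl' h01' hm'
            rcases p' with _ | ⟨w, r'⟩
            · simp at hl'
            have hw : w = 0 ∨ w = 1 := h01' w (by simp)
            have hr01' : pvBits01 r' := fun x hx => h01' x (by simp [hx])
            have hlr' : r'.length = d := by simpa using hl'
            rw [pvXval_cons, pvXval_cons]
            simp only [hit]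
            simp only [if_true, eq_self_iff_true]
            by_cases hwv : w = v
            · rw [if_pos hwv]
              have hmem' : pvMemP ((PvTrie.node a b).child v) r' := by
                rw [← hwv]
                exact hm'
              have := hmax r' hlr' hr01' hmem'
              omega
            · exfalso
              have hw' : w = 1 - v := by omega
              have hmem' : pvMemP ((PvTrie.node a b).child (1 - v)) r' := by
                rw [← hw']
                exact hm'
              rw [hopp] at hmem'
              exact pv_memP_nil r' hmem'
        · exfalso
          rw [not_not] at hsam
          rcases hv with hv | hv <;> subst hv <;>
            rcases hne with h | h <;>
            simp [PvTrie.child] at hopp hsam <;> tauto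

-- --- connecting the concrete bit lists to the greedy lemma ---
lemma pv_descRange_length : ∀ d, (pvDescRange d).length = d := by
  intro d; induction d with
  | zero => rfl
  | succ d ih => simp [pvDescRange, ih]

lemma pv_band1_emod (a : Int) : PySem.Int.band a 1 = a % 2 := by
  rw [PySem.Int.band_one]
  rw [PySem.Int.mod_eq_emod_of_pos (by norm_num)]

lemma pv_band1_01 (a : Int) : PySem.Int.band a 1 = 0 ∨ PySem.Int.band a 1 = 1 := by
  rw [pv_band1_emod]
  omega

def pvG (x v : Int) : Int := PySem.Int.band (PySem.Int.bxor x v) pvMask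

lemma pv_G_nonneg (x v : Int) : 0 ≤ pvG x v := by
  unfold pvG
  rw [pv_band_mask]
  omega

lemma pv_pvBits_desc (x : Int) :
    pvBits x = (pvDescRange 31).map (fun i => PySem.Int.band (x >>> i.toNat) 1) := by
  rw [pvBits, pv_pyRange_desc]

lemma pv_pvBits_length (x : Int) : (pvBits x).length = 31 := by
  rw [pv_pvBits_desc]
  simp [pv_descRange_length]

lemma pv_pvBits_01 (x : Int) : pvBits01 (pvBits x) := by
  rw [pv_pvBits_desc]
  intro b hb
  obtain ⟨i, _, rfl⟩ := List.mem_map.mp hb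
  exact pv_band1_01 _

lemma pv_shaped_desc (x : Int) : ∀ d,
    pvShaped d ((pvDescRange d).map (fun i => (i, PySem.Int.band (x >>> i.toNat) 1))) := by
  intro d
  induction d with
  | zero => trivial
  | succ d ih =>
      refine ⟨rfl, pv_band1_01 _, ih⟩

lemma pv_xval_desc (x v : Int) : ∀ d,
    pvXval ((pvDescRange d).map (fun i => (i, PySem.Int.band (x >>> i.toNat) 1)))
           ((pvDescRange d).map (fun i => PySem.Int.band (v >>> i.toNat) 1))
      = ((List.range d).map (fun i => ((2^i:Nat):Int) * pvDif x v i)).sum := by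
  intro d
  induction d with
  | zero => simp [pvDescRange, pvXval]
  | succ d ih =>
      have hit : (((d : Int))).toNat = d := Int.toNat_natCast d
      rw [show pvDescRange (d+1) = ((d:Int)) :: pvDescRange d from rfl,
          List.map_cons, List.map_cons, pvXval_cons]
      rw [List.range_succ, List.map_append, List.sum_append, ← ih]
      simp only [hit, pv_band1_emod, Int.shiftRight_natCast_right]
      have hterm : (if (v >>> d) % 2 = (x >>> d) % 2 then (0:Int) else ((2^d : Nat) : Int))
          = ((2^d : Nat) : Int) * pvDif x v d := by
        unfold pvDif
        by_cases h : (x >>> d) % 2 = (v >>> d) % 2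
        · rw [if_pos h.symm, if_pos h]; ring
        · rw [if_neg (fun hc => h hc.symm), if_neg h]; ring
      rw [hterm]
      simp
      ring

lemma pv_mxor_eq_xval (x v : Int) :
    pvXval ((pvDescRange 31).map (fun i => (i, PySem.Int.band (x >>> i.toNat) 1)))
           ((pvDescRange 31).map (fun i => PySem.Int.band (v >>> i.toNat) 1))
      = pvG x v := by
  rw [pv_xval_desc, pvG, pv_mxor_sum]

-- --- the trie built by the loop ---
lemma pv_insertBits_ne_nil (t : PvTrie) (v : Int) (rest : List Int) :
    t.insertBits (v :: rest) ≠ PvTrie.nil := by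
  show t.setChild v _ ≠ PvTrie.nil
  rcases t with _ | ⟨a, b⟩ <;> simp [PvTrie.setChild] <;> split <;> simp

lemma pv_insert_ne_nil (t : PvTrie) (s : Int) : t.insert s ≠ PvTrie.nil := by
  rw [PvTrie.insert, pv_pvBits_desc]
  exact pv_insertBits_ne_nil _ _ _

lemma pv_memP_foldl : ∀ (S : List Int) (t : PvTrie) (p : List Int),
    t ≠ PvTrie.nil → pvBits01 p → p.length = 31 →
    (pvMemP (S.foldl PvTrie.insert t) p ↔ pvMemP t p ∨ ∃ v ∈ S, p = pvBits v) := by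
  intro S
  induction S with
  | nil => intro t p ht _ _; simp
  | cons s S' ih =>
      intro t p ht hp hl
      rw [List.foldl_cons]
      rw [ih (t.insert s) p (pv_insert_ne_nil t s) hp hl]
      rw [PvTrie.insert, pv_memP_insertBits (pvBits s) p t ht (pv_pvBits_01 s) hp (by rw [hl, pv_pvBits_length])]
      constructor
      · rintro ((h | h) | ⟨v, hv, rfl⟩)
        · exact Or.inl h
        · exact Or.inr ⟨s, by simp, h⟩
        · exact Or.inr ⟨v, by simp [hv], rfl⟩
      · rintro (h | ⟨v, hv, rfl⟩)
        · exact Or.inl (Or.inl h)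
        · rcases List.mem_cons.mp hv with h | h
          · subst h; exact Or.inl (Or.inr rfl)
          · exact Or.inr ⟨v, h, rfl⟩

lemma pv_full_foldl : ∀ (S : List Int) (t : PvTrie), pvFull 31 t → t ≠ PvTrie.nil →
    pvFull 31 (S.foldl PvTrie.insert t) ∧ (S.foldl PvTrie.insert t) ≠ PvTrie.nil := by
  intro S
  induction S with
  | nil => intro t hf ht; exact ⟨hf, ht⟩
  | cons s S' ih =>
      intro t hf ht
      rw [List.foldl_cons]
      have h := pv_full_insertBits (pvBits s) 31 t (pv_pvBits_length s) (pv_pvBits_01 s) (Or.inr ⟨hf, ht⟩)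
      exact ih (t.insert s) h.1 h.2

lemma pv_memP_root (p : List Int) (hne : p ≠ []) : ¬ pvMemP (PvTrie.node PvTrie.nil PvTrie.nil) p := by
  rcases p with _ | ⟨w, r⟩
  · exact absurd rfl hne
  · show ¬ pvMemP ((PvTrie.node PvTrie.nil PvTrie.nil).child w) r
    have : (PvTrie.node PvTrie.nil PvTrie.nil).child w = PvTrie.nil := by
      show (if w = 0 then PvTrie.nil else PvTrie.nil) = PvTrie.nil
      split <;> rfl
    rw [this]
    exact pv_memP_nil r

lemma pv_search_root (x : Int) : PvTrie.search (PvTrie.node PvTrie.nil PvTrie.nil) x = -1 := by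
  rw [PvTrie.search, pv_pyRange_desc]
  show PvTrie.searchBits _ (((30 : Int), _) :: _) _ = -1
  have hch : ∀ w : Int, (PvTrie.node PvTrie.nil PvTrie.nil).child w = PvTrie.nil := by
    intro w
    show (if w = 0 then PvTrie.nil else PvTrie.nil) = PvTrie.nil
    split <;> rfl
  show (if (PvTrie.node PvTrie.nil PvTrie.nil).child _ ≠ PvTrie.nil then _
        else if (PvTrie.node PvTrie.nil PvTrie.nil).child _ ≠ PvTrie.nil then _ else (-1 : Int)) = -1
  simp [hch]

lemma pv_search_trieOf (S : List Int) (hS : S ≠ []) (x : Int) :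
    ∃ v0 ∈ S, PvTrie.search (S.foldl PvTrie.insert (PvTrie.node PvTrie.nil PvTrie.nil)) x = pvG x v0
      ∧ ∀ v ∈ S, pvG x v ≤ pvG x v0 := by
  rcases S with _ | ⟨s, S'⟩
  · exact absurd rfl hS
  set t := ((s :: S').foldl PvTrie.insert (PvTrie.node PvTrie.nil PvTrie.nil)) with htdef
  have hfirst := pv_full_insertBits (pvBits s) 31 (PvTrie.node PvTrie.nil PvTrie.nil)
      (pv_pvBits_length s) (pv_pvBits_01 s) (Or.inl rfl)
  have hfull : pvFull 31 t ∧ t ≠ PvTrie.nil := by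
    rw [htdef, List.foldl_cons]
    exact pv_full_foldl S' _ hfirst.1 hfirst.2
  have hmem : ∀ p, pvBits01 p → p.length = 31 →
      (pvMemP t p ↔ ∃ v ∈ s :: S', p = pvBits v) := by
    intro p h01 hl
    rw [htdef, pv_memP_foldl (s :: S') _ p (by simp) h01 hl]
    constructor
    · rintro (h | h)
      · exact absurd h (pv_memP_root p (by intro hc; rw [hc] at hl; simp at hl))
      · exact h
    · exact Or.inr
  have hsh := pv_shaped_desc x 31
  have hz : (0 : Int) = ((0 * 2^31 : Nat) : Int) := by norm_num
  obtain ⟨p, hl, h01, hm, hval, hmax⟩ := pv_greedy 31 _ t 0 hsh hfull.1 hfull.2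
  obtain ⟨v0, hv0, rfl⟩ := (hmem p h01 hl).mp hm
  refine ⟨v0, hv0, ?_, ?_⟩
  · rw [PvTrie.search, pv_pyRange_desc, ← pv_mxor_eq_xval x v0, ← pv_pvBits_desc]
    rw [hz, hval]
    norm_num
  · intro v hv
    have hmv : pvMemP t (pvBits v) := (hmem (pvBits v) (pv_pvBits_01 v) (pv_pvBits_length v)).mpr ⟨v, hv, rfl⟩
    have := hmax (pvBits v) (pv_pvBits_length v) (pv_pvBits_01 v) hmv
    rw [pv_pvBits_desc v, pv_pvBits_desc v0, pv_mxor_eq_xval, pv_mxor_eq_xval] at this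
    exact this

-- --- B side: the linear scan computes a foldl max over the filtered list ---
lemma pv_if_max (cur b : Int) : (if cur > b then cur else b) = max b cur := by
  split_ifs <;> omega

lemma pv_foldl_max (L : List Int) : ∀ b : Int,
    b ≤ L.foldl max b ∧ (∀ a ∈ L, a ≤ L.foldl max b) ∧ (L.foldl max b = b ∨ L.foldl max b ∈ L) := by
  induction L with
  | nil => intro b; exact ⟨le_refl _, by simp, Or.inl rfl⟩
  | cons a L' ih =>
      intro b
      obtain ⟨h1, h2, h3⟩ := ih (max b a)
      rw [List.foldl_cons]
      refine ⟨le_trans (le_max_left _ _) h1, ?_, ?_⟩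
      · intro c hc
        rcases List.mem_cons.mp hc with rfl | hc
        · exact le_trans (le_max_right _ _) h1
        · exact h2 c hc
      · rcases h3 with h | h
        · rcases max_choice b a with hm | hm
          · rw [h, hm]; exact Or.inl rfl
          · rw [h, hm]; exact Or.inr (by simp)
        · exact Or.inr (List.mem_cons_of_mem _ h)

lemma pv_pvBest_eq (x m : Int) : ∀ (sn : List Int) (b : Int), sn.Pairwise (· ≤ ·) →
    pvBest sn x m b = ((sn.filter (fun v => decide (v ≤ m))).map (pvG x)).foldl max b := by
  intro sn
  induction sn with
  | nil => intro b _; simp [pvBest]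
  | cons v rest ih =>
      intro b hp
      rw [List.pairwise_cons] at hp
      by_cases hvm : v > m
      · have hfil : rest.filter (fun v => decide (v ≤ m)) = [] := by
          rw [List.filter_eq_nil_iff]
          intro a ha
          simp only [decide_eq_true_eq]
          have := hp.1 a ha
          omega
        rw [List.filter_cons_of_neg (by simp; omega)]
        rw [hfil]
        show (if v > m then b else _) = _
        rw [if_pos hvm]
        simp
      · rw [List.filter_cons_of_pos (by simp; omega)]
        show (if v > m then b else pvBest rest x m (if PySem.Int.band (PySem.Int.bxor x v) pvMask > b then PySem.Int.band (PySem.Int.bxor x v) pvMask else b)) = _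
        rw [if_neg hvm, List.map_cons, List.foldl_cons, ih _ hp.2, pv_if_max]
        rfl

-- --- the incremental fill loop inserts exactly the prefix of values <= m ---
def pvTW (sn : List Int) (m : Int) : List Int := sn.takeWhile (fun v => decide (v ≤ m))

def pvSpecQ (sn q : List Int) : Int :=
  PvTrie.search ((pvTW sn (PySem.List.pyGetD q 1 0)).foldl PvTrie.insert (PvTrie.node PvTrie.nil PvTrie.nil))
    (PySem.List.pyGetD q 0 0)

lemma pv_filter_eq_takeWhile (m : Int) : ∀ (sn : List Int), sn.Pairwise (· ≤ ·) →
    sn.filter (fun v => decide (v ≤ m)) = sn.takeWhile (fun v => decide (v ≤ m)) := by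
  intro sn
  induction sn with
  | nil => intro _; rfl
  | cons v rest ih =>
      intro hp
      rw [List.pairwise_cons] at hp
      by_cases hv : v ≤ m
      · rw [List.filter_cons_of_pos (by simpa using hv), List.takeWhile_cons_of_pos (by simpa using hv)]
        rw [ih hp.2]
      · rw [List.filter_cons_of_neg (by simpa using hv), List.takeWhile_cons_of_neg (by simpa using hv)]
        rw [List.filter_eq_nil_iff.mpr]
        intro a ha
        simp only [decide_eq_true_eq]
        have := hp.1 a ha
        omega

lemma pv_takeWhile_len_le (p : Int → Bool) : ∀ (l : List Int), (l.takeWhile p).length ≤ l.length := by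
  intro l
  induction l with
  | nil => simp
  | cons a l ih =>
      by_cases h : p a
      · rw [List.takeWhile_cons_of_pos h]; simpa using ih
      · rw [List.takeWhile_cons_of_neg (by simpa using h)]; simp

lemma pv_takeWhile_boundary (p : Int → Bool) : ∀ (l : List Int) (h : (l.takeWhile p).length < l.length),
    p (l[(l.takeWhile p).length]'h) = false := by
  intro l
  induction l with
  | nil => intro h; simp at h
  | cons a l ih =>
      intro h
      by_cases hp : p a
      · simp only [List.takeWhile_cons_of_pos hp, List.length_cons, List.getElem_cons_succ]
        apply ih
      · simp only [List.takeWhile_cons_of_neg (by simpa using hp), List.length_nil,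
          List.getElem_cons_zero]
        simpa using hp

lemma pv_TW_getElem (sn : List Int) (m : Int) (j : Nat) (h : j < (pvTW sn m).length) :
    (pvTW sn m)[j]'h = sn[j]'(lt_of_lt_of_le h (pv_takeWhile_len_le _ sn)) := by
  unfold pvTW at h ⊢
  exact List.IsPrefix.getElem (List.takeWhile_prefix _) h

lemma pv_fill_spec (sn : List Int) (m : Int) : ∀ (k j : Nat) (t : PvTrie),
    (pvTW sn m).length - j ≤ k → j ≤ (pvTW sn m).length →
    pvFill t sn j m = (((pvTW sn m).drop j).foldl PvTrie.insert t, (pvTW sn m).length) := by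
  intro k
  induction k with
  | zero =>
      intro j t hk hj
      have hjL : j = (pvTW sn m).length := by omega
      subst hjL
      rw [List.drop_length, List.foldl_nil]
      rw [pvFill]
      by_cases hlen : (pvTW sn m).length < sn.length
      · rw [dif_pos hlen]
        have hb := pv_takeWhile_boundary (fun v => decide (v ≤ m)) sn hlen
        simp only [decide_eq_false_iff_not, not_le] at hb
        have hb' : m < sn[(pvTW sn m).length]'hlen := hb
        rw [if_neg (not_le.mpr hb')]
      · rw [dif_neg hlen]
  | succ k ih =>
      intro j t hk hj
      by_cases hjL : j < (pvTW sn m).length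
      · have hjlen : j < sn.length := lt_of_lt_of_le hjL (pv_takeWhile_len_le _ sn)
        have hmem : sn[j] ≤ m := by
          have : (pvTW sn m)[j]'hjL ∈ pvTW sn m := List.getElem_mem _
          have hp := List.mem_takeWhile_imp this
          rw [pv_TW_getElem sn m j hjL] at hp
          simpa using hp
        rw [pvFill, dif_pos hjlen, if_pos hmem]
        rw [ih (j+1) (t.insert sn[j]) (by omega) (by omega)]
        have hdrop : (pvTW sn m).drop j = sn[j] :: (pvTW sn m).drop (j+1) := by
          rw [List.drop_eq_getElem_cons hjL, pv_TW_getElem sn m j hjL]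
        rw [hdrop, List.foldl_cons]
      · have hjL' : j = (pvTW sn m).length := by omega
        subst hjL'
        rw [List.drop_length, List.foldl_nil]
        rw [pvFill]
        by_cases hlen : (pvTW sn m).length < sn.length
        · rw [dif_pos hlen]
          have hb := pv_takeWhile_boundary (fun v => decide (v ≤ m)) sn hlen
          simp only [decide_eq_false_iff_not, not_le] at hb
          have hb' : m < sn[(pvTW sn m).length]'hlen := hb
          rw [if_neg (not_le.mpr hb')]
        · rw [dif_neg hlen]

lemma pv_TW_mono (sn : List Int) (hs : sn.Pairwise (· ≤ ·)) (m m' : Int) (h : m ≤ m') :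
    (pvTW sn m).length ≤ (pvTW sn m').length := by
  rw [pvTW, pvTW, ← pv_filter_eq_takeWhile m sn hs, ← pv_filter_eq_takeWhile m' sn hs]
  rw [← List.countP_eq_length_filter, ← List.countP_eq_length_filter]
  apply List.countP_mono_left
  intro a _ hp
  simp only [decide_eq_true_eq] at hp ⊢
  omega

lemma pv_take_of_prefix (sn : List Int) (m : Int) (j : Nat) (hj : j ≤ (pvTW sn m).length) :
    sn.take j = (pvTW sn m).take j := by
  obtain ⟨r, hr⟩ := List.takeWhile_prefix (l := sn) (fun v => decide (v ≤ m))
  have hr' : pvTW sn m ++ r = sn := by rw [pvTW]; exact hr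
  have h := List.take_append_of_le_length (l₂ := r) hj
  rw [hr'] at h
  exact h

lemma pv_TW_take_self (sn : List Int) (m : Int) :
    sn.take (pvTW sn m).length = pvTW sn m := by
  obtain ⟨r, hr⟩ := List.takeWhile_prefix (l := sn) (fun v => decide (v ≤ m))
  have hr' : pvTW sn m ++ r = sn := by rw [pvTW]; exact hr
  have h := List.take_left (l₁ := pvTW sn m) (l₂ := r)
  rw [hr'] at h
  exact h

-- --- the offline main loop writes pvSpecQ at each queried index ---
lemma pv_main_spec (sn : List Int) (hs : sn.Pairwise (· ≤ ·)) :
    ∀ (pairs : List (Int × List Int)) (j : Nat) (ans : List Int),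
    pairs.Pairwise (fun p q => PySem.List.pyGetD p.2 1 0 ≤ PySem.List.pyGetD q.2 1 0) →
    (∀ pr ∈ pairs, j ≤ (pvTW sn (PySem.List.pyGetD pr.2 1 0)).length) →
    pvMain ((sn.take j).foldl PvTrie.insert (PvTrie.node PvTrie.nil PvTrie.nil)) sn j ans pairs
      = pairs.foldl (fun a pr => a.set pr.1.toNat (pvSpecQ sn pr.2)) ans := by
  intro pairs
  induction pairs with
  | nil => intro j ans _ _; rfl
  | cons pr rest ih =>
      intro j ans hpw hble
      obtain ⟨i, q⟩ := pr
      rw [List.pairwise_cons] at hpw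
      set m := PySem.List.pyGetD q 1 0 with hm
      have hj : j ≤ (pvTW sn m).length := hble (i, q) (by simp)
      show pvMain _ sn j ans ((i, q) :: rest) = _
      rw [pvMain]
      have hfill := pv_fill_spec sn m ((pvTW sn m).length - j) j
        ((sn.take j).foldl PvTrie.insert (PvTrie.node PvTrie.nil PvTrie.nil)) (le_refl _) hj
      rw [hfill]
      have htrie : ((pvTW sn m).drop j).foldl PvTrie.insert
            ((sn.take j).foldl PvTrie.insert (PvTrie.node PvTrie.nil PvTrie.nil))
          = (pvTW sn m).foldl PvTrie.insert (PvTrie.node PvTrie.nil PvTrie.nil) := by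
        rw [pv_take_of_prefix sn m j hj, ← List.foldl_append, List.take_append_drop]
      simp only [htrie]
      have hnext : ∀ pr' ∈ rest, (pvTW sn m).length ≤ (pvTW sn (PySem.List.pyGetD pr'.2 1 0)).length := by
        intro pr' hpr'
        exact pv_TW_mono sn hs _ _ (hpw.1 pr' hpr')
      have hstep := ih (pvTW sn m).length (ans.set i.toNat
        (PvTrie.search ((pvTW sn m).foldl PvTrie.insert (PvTrie.node PvTrie.nil PvTrie.nil)) (PySem.List.pyGetD q 0 0)))
        hpw.2 hnext
      rw [pv_TW_take_self] at hstep
      rw [hstep]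
      rfl

-- --- writing each answer once, at distinct indices, yields the per-query map ---
lemma pv_foldl_set_length (g : List Int → Int) : ∀ (P : List (Int × List Int)) (ans : List Int),
    (P.foldl (fun a pr => a.set pr.1.toNat (g pr.2)) ans).length = ans.length := by
  intro P
  induction P with
  | nil => intro ans; rfl
  | cons pr P' ih => intro ans; rw [List.foldl_cons, ih, List.length_set]

lemma pv_foldl_set_get_ne (g : List Int → Int) : ∀ (P : List (Int × List Int)) (ans : List Int) (k : Nat),
    (∀ pr ∈ P, pr.1.toNat ≠ k) →
    (P.foldl (fun a pr => a.set pr.1.toNat (g pr.2)) ans)[k]? = ans[k]? := by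
  intro P
  induction P with
  | nil => intro ans k _; rfl
  | cons pr P' ih =>
      intro ans k hne
      rw [List.foldl_cons, ih _ _ (fun pr' h => hne pr' (by simp [h]))]
      exact List.getElem?_set_ne (hne pr (by simp))

lemma pv_foldl_set_get (g : List Int → Int) : ∀ (P : List (Int × List Int)) (ans : List Int) (k : Nat)
    (i0 : Int) (q0 : List Int), (i0, q0) ∈ P → i0.toNat = k → (∀ pr ∈ P, 0 ≤ pr.1) →
    (P.map Prod.fst).Nodup → k < ans.length →
    (P.foldl (fun a pr => a.set pr.1.toNat (g pr.2)) ans)[k]? = some (g q0) := by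
  intro P
  induction P with
  | nil => intro ans k i0 q0 h; simp at h
  | cons pr P' ih =>
      intro ans k i0 q0 hmem hk h0 hnd hlt
      rw [List.map_cons, List.nodup_cons] at hnd
      rcases List.mem_cons.mp hmem with heq | hmem'
      · subst heq
        rw [List.foldl_cons]
        rw [pv_foldl_set_get_ne g P' _ k ?_]
        · rw [hk]
          exact List.getElem?_set_self hlt
        · intro pr' hpr' hcon
          apply hnd.1
          have h1 : 0 ≤ pr'.1 := h0 pr' (by simp [hpr'])
          have h2 : 0 ≤ i0 := h0 (i0, q0) (by simp)
          have : pr'.1 = i0 := by omega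
          rw [← this]
          exact List.mem_map.mpr ⟨pr', hpr', rfl⟩
      · rw [List.foldl_cons]
        exact ih _ k i0 q0 hmem' hk (fun pr' h => h0 pr' (by simp [h])) hnd.2
          (by rw [List.length_set]; exact hlt)

-- --- per-query value: the trie answer equals the linear-scan answer ---
lemma pv_value_eq (sn : List Int) (hs : sn.Pairwise (· ≤ ·)) (q : List Int) :
    pvSpecQ sn q = pvBest sn (PySem.List.pyGetD q 0 0) (PySem.List.pyGetD q 1 0) (-1) := by
  set x := PySem.List.pyGetD q 0 0 with hx
  set m := PySem.List.pyGetD q 1 0 with hm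
  rw [pv_pvBest_eq x m sn (-1) hs, pv_filter_eq_takeWhile m sn hs]
  rw [pvSpecQ, ← hx, ← hm]
  have hTWeq : pvTW sn m = sn.takeWhile (fun v => decide (v ≤ m)) := rfl
  by_cases hne : pvTW sn m = []
  · rw [hne, ← hTWeq, hne]
    simp only [List.foldl_nil, List.map_nil]
    exact pv_search_root x
  · obtain ⟨v0, hv0, hsearch, hmax⟩ := pv_search_trieOf (pvTW sn m) hne x
    rw [hsearch, ← hTWeq]
    obtain ⟨h1, h2, h3⟩ := pv_foldl_max ((pvTW sn m).map (pvG x)) (-1)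
    have hle : pvG x v0 ≤ ((pvTW sn m).map (pvG x)).foldl max (-1) :=
      h2 _ (List.mem_map_of_mem hv0)
    rcases h3 with h | h
    · exfalso
      have := pv_G_nonneg x v0
      omega
    · obtain ⟨v1, hv1, hv1e⟩ := List.mem_map.mp h
      have hge := hmax v1 hv1
      omega

-- --- the sorted (index, query) pairs are a permutation of the enumeration ---
lemma pv_enum_getElem (n : Nat) (queries : List (List Int)) (hn : n = queries.length)
    (k : Nat) (hk : k < n) :
    (((List.range n).map Int.ofNat).zip queries)[k]'(by simp [List.length_zip, hn, hk]; omega)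
      = ((k : Int), queries[k]'(by omega)) := by
  rw [List.getElem_zip]
  congr 1
  simp

-- ===== final assembly =====
theorem pv_main_theorem : ∀ (nums : List Int) (queries : List (List Int)),
    maximizeXor nums queries = maximizeXor_alt nums queries := by
  intro nums queries
  rw [maximizeXor, maximizeXor_alt]
  set sn := PySem.List.sorted nums (fun v => v) false with hsn
  have hsorted : sn.Pairwise (· ≤ ·) := PySem.List.sorted_pairwise nums (fun v => v)
  set n := queries.length with hn
  set enum := ((List.range n).map Int.ofNat).zip queries with henum
  set pairs := PySem.List.sorted enum (fun p => PySem.List.pyGetD p.2 1 0) false with hpairs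
  have hperm : pairs.Perm enum := PySem.List.sorted_perm enum _ false
  have hpw : pairs.Pairwise (fun p q => PySem.List.pyGetD p.2 1 0 ≤ PySem.List.pyGetD q.2 1 0) :=
    PySem.List.sorted_pairwise enum _
  have hlenum : enum.length = n := by
    rw [henum, List.length_zip]
    simp [hn]
  have hmain := pv_main_spec sn hsorted pairs 0 (List.replicate n (-1 : Int)) hpw
    (fun pr _ => Nat.zero_le _)
  simp only [List.take_zero, List.foldl_nil] at hmain
  rw [hmain]
  have hvals : (fun q => pvBest sn (PySem.List.pyGetD q 0 0) (PySem.List.pyGetD q 1 0) (-1))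
      = fun q => pvSpecQ sn q := funext (fun q => (pv_value_eq sn hsorted q).symm)
  rw [hvals]
  -- both sides have length n
  have hlenL : (pairs.foldl (fun a pr => a.set pr.1.toNat (pvSpecQ sn pr.2)) (List.replicate n (-1 : Int))).length = n := by
    rw [pv_foldl_set_length, List.length_replicate]
  -- firsts of pairs: nonneg and nodup
  have hfst : ∀ pr ∈ pairs, 0 ≤ pr.1 := by
    intro pr hpr
    have hprm : pr ∈ enum := hperm.mem_iff.mp hpr
    obtain ⟨a, b⟩ := pr
    obtain ⟨ha, _⟩ := List.of_mem_zip hprm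
    obtain ⟨j, _, rfl⟩ := List.mem_map.mp ha
    simp
  have hnd : (pairs.map Prod.fst).Nodup := by
    have hp2 : (pairs.map Prod.fst).Perm (enum.map Prod.fst) := hperm.map _
    rw [hp2.nodup_iff, henum, List.map_fst_zip (by simp [hn])]
    exact List.Nodup.map (fun a b h => by simpa using h) List.nodup_range
  apply List.ext_getElem?
  intro k
  by_cases hk : k < n
  · have hmemk : ((k : Int), queries[k]'(by omega)) ∈ pairs := by
      rw [hperm.mem_iff]
      have := pv_enum_getElem n queries hn k hk
      rw [← this]
      exact List.getElem_mem _
    rw [pv_foldl_set_get (pvSpecQ sn) pairs _ k (k : Int) (queries[k]'(by omega)) hmemk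
      (Int.toNat_natCast k) hfst hnd (by rw [List.length_replicate]; exact hk)]
    rw [List.getElem?_map, List.getElem?_eq_getElem (by omega : k < queries.length)]
    rfl
  · rw [List.getElem?_eq_none_iff.mpr (by rw [List.length_map]; omega : (List.map (fun q => pvSpecQ sn q) queries).length ≤ k)]
    rw [List.getElem?_eq_none_iff.mpr (by rw [hlenL]; omega)]

-- ===== VERDICT (by name: the statement is the Claim_ definition above) =====
theorem maximizeXor_spec : Claim_equal_maximizeXor := by
  intro nums queries _ _
  exact pv_main_theorem nums queries
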